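-- pv_equiv track=rewrite | github.com/lsh0107/solving_algorithms | 프로그래머스/2/70129. 이진 변환 반복하기/이진 변환 반복하기.py | solution
-- ===== SOURCE A (Python) =====
-- def solution(s):
--     answer = [0, 0]
--
--     while len(s) > 1:
--         new_s = ''
--         count = s.count('0')
--         answer[0] += 1
--         answer[1] += count
--         s = s.replace('0', '')
--         length = len(s)
--         while length >= 1:
--             r = length % 2
--             length = length // 2
--             new_s += str(r)
--
--         s = new_s[::-1]
--
--     return answer
-- ===== SOURCE B (Python) =====
-- def solution(s):
--     # Recurse on the integer whose binary string the process works on,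
--     # instead of simulating the string rewriting iteratively.
--     def f(m):
--         # steps/zeros needed to shrink the binary string of m down to length 1
--         if m <= 1:
--             return (0, 0)
--         ones = bin(m).count('1')
--         st, z = f(ones)
--         return (st + 1, z + m.bit_length() - ones)
--
--     if len(s) <= 1:
--         return [0, 0]
--     n = len(s) - s.count('0')  # non-'0' characters survive the removal
--     st, z = f(n)
--     return [st + 1, z + len(s) - n]
-- ===== Notes on version B (the rewrite author's own statement) =====
-- stated objective: alternative
-- what changed: B replaces A's iterative string rewriting (count zeros, delete them, hand-build the binary string, reverse, repeat) by a recursive function f(m) on the integer m whose binary string the process works on, defined by structural recursion f(m) = (1+steps, bit_length(m)-popcount(m)+zeros) of f(popcount(m)); the outer loop and all intermediate strings disappear.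
import Mathlib
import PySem

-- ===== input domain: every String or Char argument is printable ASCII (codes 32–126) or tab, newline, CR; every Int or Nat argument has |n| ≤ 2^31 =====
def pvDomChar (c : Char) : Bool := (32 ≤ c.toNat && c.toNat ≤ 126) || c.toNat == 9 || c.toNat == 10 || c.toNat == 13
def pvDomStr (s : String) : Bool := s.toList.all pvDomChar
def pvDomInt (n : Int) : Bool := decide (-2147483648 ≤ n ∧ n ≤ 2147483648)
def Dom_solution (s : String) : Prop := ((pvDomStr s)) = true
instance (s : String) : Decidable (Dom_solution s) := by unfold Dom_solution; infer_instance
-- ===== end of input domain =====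

-- B replaces A's iterative string rewriting by a recursion on the integer whose binary string
-- the process works on; return values proved equal.

-- ===== PORT A =====
-- A's inner `while length >= 1` loop: appends the binary digits of `length`, LSB first
def solInner (length : Int) (new_s : String) : String :=
  if length ≥ 1 then
    solInner (PySem.Int.floordiv length 2) (new_s ++ PySem.Int.toStr (PySem.Int.mod length 2))
  else new_s
termination_by length.toNat
decreasing_by
  have h2 : PySem.Int.floordiv length 2 = length / 2 :=
    PySem.Int.floordiv_eq_ediv_of_pos (by omega)
  rw [h2]; omega

-- A's outer `while len(s) > 1` loop; the fuel argument is only a totality guard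
def solLoop : Nat → String → Int → Int → List Int
  | 0, _, a0, a1 => [a0, a1]
  | fuel+1, s, a0, a1 =>
    if PySem.Str.len s > 1 then
      solLoop fuel
        ((PySem.Str.slice? (solInner (PySem.Str.len (PySem.Str.replace s "0" "")) "")
            none none (-1)).getD "")                               -- s = new_s[::-1]
        (a0 + 1) (a1 + (PySem.Str.count s "0" : Int))
    else [a0, a1]

def solution (s : String) : List Int := solLoop (s.toList.length + 2) s 0 0

-- ===== PORT B =====
-- Source B's recursive f(m); the fuel argument is only a totality guard
def altF : Nat → Int → Int × Int
  | 0, _ => (0, 0)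
  | fuel+1, m =>
    if m ≤ 1 then (0, 0)
    else
      let ones : Int := (PySem.Int.bitCount m : Int)
      let p := altF fuel ones
      (p.1 + 1, p.2 + (PySem.Int.bitLength m : Int) - ones)

def solution_alt (s : String) : List Int :=
  if PySem.Str.len s ≤ 1 then [0, 0]
  else
    let n := PySem.Str.len s - (PySem.Str.count s "0" : Int)
    let p := altF (n.toNat + 1) n
    [p.1 + 1, p.2 + PySem.Str.len s - n]

-- ===== PRECONDITION & SPEC =====
def Spec_solution (s : String) (out : List Int) : Prop := out = solution_alt s
instance (s : String) (out : List Int) : Decidable (Spec_solution s out) := by unfold Spec_solution; infer_instance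

-- ===== CLAIM (what is proved, stated in full; the proofs are below) =====
def Claim_equal_solution : Prop := ∀ (s : String), Dom_solution s → Spec_solution s (solution s)

-- ===== LEMMAS AND PROOFS =====

-- proof-side reformulation of A's outer loop over the pair (length, non-zero count)
def altLoop : Nat → Int → Int → Int → Int → List Int
  | 0, _, _, steps, zeros => [steps, zeros]
  | fuel+1, length, n, steps, zeros =>
    if length > 1 then
      altLoop fuel (PySem.Int.bitLength n : Int) (PySem.Int.bitCount n : Int)
        (steps + 1) (zeros + (length - n))
    else [steps, zeros]

-- s.count('0') counts single characters
lemma countGo_single (fuel : Nat) : ∀ (l : List Char) (acc : Nat), l.length ≤ fuel →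
    PySem.Chars.count.go ['0'] fuel l acc = acc + l.count '0' := by
  induction fuel with
  | zero =>
    intro l acc h
    have hl : l = [] := List.eq_nil_of_length_eq_zero (Nat.le_zero.mp h)
    subst hl; simp [PySem.Chars.count.go]
  | succ k ih =>
    intro l acc h
    cases l with
    | nil => simp [PySem.Chars.count.go]
    | cons c t =>
      simp only [List.length_cons] at h
      by_cases hc : c = '0'
      · subst hc
        rw [show PySem.Chars.count.go ['0'] (k+1) ('0'::t) acc
              = PySem.Chars.count.go ['0'] k t (acc+1) by
            simp [PySem.Chars.count.go, List.isPrefixOf]]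
        rw [ih t (acc+1) (by omega)]
        simp; omega
      · rw [show PySem.Chars.count.go ['0'] (k+1) (c::t) acc
              = PySem.Chars.count.go ['0'] k t acc by
            simp [PySem.Chars.count.go, List.isPrefixOf, Ne.symm hc]]
        rw [ih t acc (by omega)]
        simp [hc]

lemma count_single (cs : List Char) : PySem.Chars.count cs ['0'] = cs.count '0' := by
  rw [PySem.Chars.count, if_neg (by simp)]
  rw [countGo_single cs.length cs 0 le_rfl]
  omega

-- s.replace('0', '') filters out the '0' characters
lemma replaceGo_single (fuel : Nat) : ∀ (l acc : List Char), l.length ≤ fuel →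
    PySem.Chars.replace.go ['0'] [] fuel l acc
      = acc.reverse ++ l.filter (fun c => !(c == '0')) := by
  induction fuel with
  | zero =>
    intro l acc h
    have hl : l = [] := List.eq_nil_of_length_eq_zero (Nat.le_zero.mp h)
    subst hl; simp [PySem.Chars.replace.go]
  | succ k ih =>
    intro l acc h
    cases l with
    | nil => simp [PySem.Chars.replace.go]
    | cons c t =>
      simp only [List.length_cons] at h
      by_cases hc : c = '0'
      · subst hc
        rw [show PySem.Chars.replace.go ['0'] [] (k+1) ('0'::t) acc
              = PySem.Chars.replace.go ['0'] [] k t acc by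
            simp [PySem.Chars.replace.go, List.isPrefixOf]]
        rw [ih t acc (by omega)]
        simp
      · rw [show PySem.Chars.replace.go ['0'] [] (k+1) (c::t) acc
              = PySem.Chars.replace.go ['0'] [] k t (c::acc) by
            simp [PySem.Chars.replace.go, List.isPrefixOf, Ne.symm hc]]
        rw [ih t (c::acc) (by omega)]
        simp [hc]

lemma replace_single (cs : List Char) :
    PySem.Chars.replace cs ['0'] [] = cs.filter (fun c => !(c == '0')) := by
  rw [PySem.Chars.replace, if_neg (by simp)]
  rw [replaceGo_single cs.length cs [] le_rfl]
  simp

-- the inner loop writes bitLength m binary digits, bitCount m of them '1'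
lemma solInner_spec : ∀ (k : Nat) (m : Int), m.toNat ≤ k → 0 ≤ m → ∀ acc : String,
    (solInner m acc).toList.length = acc.toList.length + PySem.Int.bitLength m ∧
    (solInner m acc).toList.count '0' + PySem.Int.bitCount m
      = acc.toList.count '0' + PySem.Int.bitLength m := by
  intro k
  induction k with
  | zero =>
    intro m hk hm acc
    have hm0 : m = 0 := by omega
    subst hm0
    rw [solInner, if_neg (by omega)]
    simp [PySem.Int.bitLength_zero, PySem.Int.bitCount_zero]
  | succ k ih =>
    intro m hk hm acc
    by_cases h1 : m ≥ 1
    · have hfd : PySem.Int.floordiv m 2 = m / 2 :=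
        PySem.Int.floordiv_eq_ediv_of_pos (by omega)
      have hbl : PySem.Int.bitLength m = PySem.Int.bitLength (PySem.Int.floordiv m 2) + 1 :=
        PySem.Int.bitLength_of_pos (by omega)
      have hbc : PySem.Int.bitCount m
          = (PySem.Int.mod m 2).toNat + PySem.Int.bitCount (PySem.Int.floordiv m 2) :=
        PySem.Int.bitCount_of_pos (by omega)
      have hr0 : 0 ≤ PySem.Int.mod m 2 := PySem.Int.mod_nonneg m (by omega)
      have hr2 : PySem.Int.mod m 2 < 2 := PySem.Int.mod_lt m (by omega)
      have hk' : (PySem.Int.floordiv m 2).toNat ≤ k := by rw [hfd]; omega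
      have hm' : 0 ≤ PySem.Int.floordiv m 2 := by rw [hfd]; omega
      rw [solInner, if_pos h1]
      rcases (show PySem.Int.mod m 2 = 0 ∨ PySem.Int.mod m 2 = 1 by omega) with hr | hr
      · rw [hr, show PySem.Int.toStr 0 = "0" from rfl, hbl, hbc, hfd]
        obtain ⟨hL, hC⟩ := ih (PySem.Int.floordiv m 2) hk' hm' (acc ++ "0")
        rw [hfd] at hL hC
        simp at hL hC ⊢
        rw [PySem.Int.mod_eq_emod_of_pos (by omega : (0:Int) < 2)] at hr
        omega
      · rw [hr, show PySem.Int.toStr 1 = "1" from rfl, hbl, hbc, hfd]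
        obtain ⟨hL, hC⟩ := ih (PySem.Int.floordiv m 2) hk' hm' (acc ++ "1")
        rw [hfd] at hL hC
        simp at hL hC ⊢
        rw [PySem.Int.mod_eq_emod_of_pos (by omega : (0:Int) < 2)] at hr
        omega
    · have hm0 : m = 0 := by omega
      subst hm0
      rw [solInner, if_neg (by omega)]
      simp [PySem.Int.bitLength_zero, PySem.Int.bitCount_zero]

-- each round of A, seen through (length, non-zero count), is a round of altLoop
lemma loop_eq : ∀ (fuel : Nat) (s : String) (a0 a1 : Int),
    solLoop fuel s a0 a1
      = altLoop fuel (PySem.Str.len s) (PySem.Str.len s - (PySem.Str.count s "0" : Int)) a0 a1 := by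
  intro fuel
  induction fuel with
  | zero => intro s a0 a1; rfl
  | succ k ih =>
    intro s a0 a1
    by_cases hc : PySem.Str.len s > 1
    · rw [solLoop, altLoop, if_pos hc, if_pos hc]
      set s1 := PySem.Str.replace s "0" "" with hs1
      have hs1l : s1.toList = s.toList.filter (fun c => !(c == '0')) := by
        rw [hs1, PySem.Str.toList_replace,
          show ("0":String).toList = ['0'] from rfl,
          show ("":String).toList = [] from rfl]
        exact replace_single s.toList
      set new_s := solInner (PySem.Str.len s1) "" with hnew
      have hn0 : (0:Int) ≤ PySem.Str.len s1 := by
        rw [PySem.Str.len_eq]; exact Int.natCast_nonneg _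
      obtain ⟨hL, hC⟩ := solInner_spec (PySem.Str.len s1).toNat _ le_rfl hn0 ""
      set s2 := (PySem.Str.slice? new_s none none (-1)).getD "" with hs2
      have hs2l : s2.toList = new_s.toList.reverse := by
        rw [hs2, PySem.Str.slice?_none_none_neg_one]; simp
      have hcount : (PySem.Str.count s "0" : Nat) = s.toList.count '0' := by
        rw [PySem.Str.count_eq, show ("0":String).toList = ['0'] from rfl]
        exact count_single s.toList
      have hcnt1 : s.toList.count '0' = (s.toList.filter (fun c => c == '0')).length :=
        List.count_eq_length_filter
      have hsplit : (s.toList.filter (fun c => c == '0')).length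
            + (s.toList.filter (fun c => !(c == '0'))).length = s.toList.length :=
        (List.length_eq_length_filter_add _).symm
      -- n = len(s1)
      have hn : PySem.Str.len s - (PySem.Str.count s "0" : Int) = PySem.Str.len s1 := by
        rw [PySem.Str.len_eq s, PySem.Str.len_eq s1, hcount, hs1l]
        omega
      -- length and zero count of the next string s2
      have hs2len : PySem.Str.len s2 = (PySem.Int.bitLength (PySem.Str.len s1) : Int) := by
        rw [PySem.Str.len_eq, hs2l, List.length_reverse, hL]
        simp
      have hs2cnt : (PySem.Str.count s2 "0" : Nat)
          + PySem.Int.bitCount (PySem.Str.len s1)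
          = PySem.Int.bitLength (PySem.Str.len s1) := by
        rw [PySem.Str.count_eq, show ("0":String).toList = ['0'] from rfl,
          count_single s2.toList, hs2l, List.count_reverse]
        simpa using hC
      have hargn : PySem.Str.len s2 - (PySem.Str.count s2 "0" : Int)
          = (PySem.Int.bitCount (PySem.Str.len s1) : Int) := by
        rw [hs2len]; omega
      have harg : (PySem.Str.count s "0" : Int) = PySem.Str.len s - PySem.Str.len s1 := by
        omega
      rw [ih s2, hargn, hs2len, hn, harg]
    · rw [solLoop, altLoop, if_neg hc, if_neg hc]

-- bitCount m < m for m ≥ 2 (needed to show the fuel bounds suffice)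
lemma bitCount_lt : ∀ (k : Nat) (m : Int), m.toNat ≤ k → 2 ≤ m →
    (PySem.Int.bitCount m : Int) < m := by
  intro k
  induction k with
  | zero => intro m hk hm; omega
  | succ k ih =>
    intro m hk hm
    have hfd : PySem.Int.floordiv m 2 = m / 2 :=
      PySem.Int.floordiv_eq_ediv_of_pos (by omega)
    have hbc : PySem.Int.bitCount m
        = (PySem.Int.mod m 2).toNat + PySem.Int.bitCount (PySem.Int.floordiv m 2) :=
      PySem.Int.bitCount_of_pos (by omega)
    have hr0 : 0 ≤ PySem.Int.mod m 2 := PySem.Int.mod_nonneg m (by omega)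
    have hr2 : PySem.Int.mod m 2 < 2 := PySem.Int.mod_lt m (by omega)
    have hrd : PySem.Int.mod m 2 = m % 2 := PySem.Int.mod_eq_emod_of_pos (by omega)
    by_cases h2 : 2 ≤ PySem.Int.floordiv m 2
    · have := ih (PySem.Int.floordiv m 2) (by rw [hfd]; omega) h2
      omega
    · have h1 : PySem.Int.floordiv m 2 = 1 := by rw [hfd] at h2 ⊢; omega
      rw [h1, show PySem.Int.bitCount 1 = 1 from rfl] at hbc
      omega

-- bitLength n > 1 iff n ≥ 2 (for n ≥ 0)
lemma bitLength_gt_one (n : Int) (h0 : 0 ≤ n) :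
    ((PySem.Int.bitLength n : Int) > 1) ↔ 2 ≤ n := by
  constructor
  · intro h
    by_contra hn
    rcases (show n = 0 ∨ n = 1 by omega) with h' | h' <;> subst h' <;>
      simp [show PySem.Int.bitLength 0 = 0 from rfl,
            show PySem.Int.bitLength 1 = 1 from rfl] at h
  · intro h
    have hb1 : PySem.Int.bitLength n = PySem.Int.bitLength (PySem.Int.floordiv n 2) + 1 :=
      PySem.Int.bitLength_of_pos (by omega)
    have hfd : PySem.Int.floordiv n 2 = n / 2 :=
      PySem.Int.floordiv_eq_ediv_of_pos (by omega)
    have hb2 : PySem.Int.bitLength (PySem.Int.floordiv n 2)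
        = PySem.Int.bitLength (PySem.Int.floordiv (PySem.Int.floordiv n 2) 2) + 1 :=
      PySem.Int.bitLength_of_pos (by rw [hfd]; omega)
    omega

-- bridge between altLoop (A's rounds on counters) and B's recursion altF
lemma bridge : ∀ (k : Nat) (n : Int), 0 ≤ n → n.toNat ≤ k →
    ∀ (fuel1 fuel2 : Nat), n.toNat < fuel1 → n.toNat < fuel2 → ∀ (a0 a1 : Int),
    altLoop fuel1 ((PySem.Int.bitLength n : Int)) ((PySem.Int.bitCount n : Int)) a0 a1
      = [a0 + (altF fuel2 n).1, a1 + (altF fuel2 n).2] := by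
  intro k
  induction k with
  | zero =>
    intro n h0 hk fuel1 fuel2 hf1 hf2 a0 a1
    have hn0 : n = 0 := by omega
    subst hn0
    obtain ⟨f1, rfl⟩ := Nat.exists_eq_succ_of_ne_zero (by omega : fuel1 ≠ 0)
    obtain ⟨f2, rfl⟩ := Nat.exists_eq_succ_of_ne_zero (by omega : fuel2 ≠ 0)
    rw [altLoop, if_neg (by simp [show PySem.Int.bitLength 0 = 0 from rfl])]
    rw [altF, if_pos (by omega)]
    simp
  | succ k ih =>
    intro n h0 hk fuel1 fuel2 hf1 hf2 a0 a1
    obtain ⟨f1, rfl⟩ := Nat.exists_eq_succ_of_ne_zero (by omega : fuel1 ≠ 0)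
    obtain ⟨f2, rfl⟩ := Nat.exists_eq_succ_of_ne_zero (by omega : fuel2 ≠ 0)
    by_cases h2 : 2 ≤ n
    · have hlt : (PySem.Int.bitCount n : Int) < n := bitCount_lt n.toNat n le_rfl h2
      rw [altLoop, if_pos ((bitLength_gt_one n h0).mpr h2)]
      rw [altF, if_neg (by omega)]
      rw [ih (PySem.Int.bitCount n : Int) (by omega) (by omega) f1 f2 (by omega) (by omega)]
      simp only [List.cons.injEq, and_true]
      constructor <;> ring
    · rw [altLoop, if_neg (by
        have := (bitLength_gt_one n h0).mp
        by_contra hcon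
        exact absurd ((bitLength_gt_one n h0).mp (by omega)) (by omega))]
      rw [altF, if_pos (by omega)]
      simp
  
-- ===== VERDICT (by name: the statement is the Claim_ definition above) =====
theorem solution_spec : Claim_equal_solution := by
  intro s _
  unfold Spec_solution solution solution_alt
  rw [loop_eq]
  have hlen : PySem.Str.len s = (s.toList.length : Int) := PySem.Str.len_eq s
  have hcount : (PySem.Str.count s "0" : Nat) = s.toList.count '0' := by
    rw [PySem.Str.count_eq, show ("0":String).toList = ['0'] from rfl]
    exact count_single s.toList
  have hcle : s.toList.count '0' ≤ s.toList.length := List.count_le_length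
  set L := PySem.Str.len s with hL
  set n := PySem.Str.len s - (PySem.Str.count s "0" : Int) with hn
  have h0n : 0 ≤ n := by omega
  have hnL : n ≤ L := by omega
  by_cases hc : L > 1
  · rw [if_neg (by omega)]
    rw [show s.toList.length + 2 = (s.toList.length + 1) + 1 from rfl]
    rw [altLoop, if_pos hc]
    rw [bridge n.toNat n h0n le_rfl (s.toList.length + 1) (n.toNat + 1)
        (by omega) (by omega)]
    simp only [List.cons.injEq, and_true]
    constructor <;> ring
  · rw [if_pos (by omega)]
    rw [show s.toList.length + 2 = (s.toList.length + 1) + 1 from rfl]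
    rw [altLoop, if_neg hc]
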